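-- pv_equiv track=rewrite | github.com/pikamomo/CS336_assignment1 | cs336_basics/bpe.py | get_new_word
-- ===== SOURCE A (Python) =====
-- def get_new_word(
--     word: tuple[int, ...],
--     target_pair: tuple[int, int],
--     new_id: int,
-- ) -> tuple[int, ...]:
--     a, b = target_pair
--     new_word = []
--     i = 0
--
--     while i < len(word):
--         if i + 1 < len(word) and word[i] == a and word[i + 1] == b:
--             new_word.append(new_id)
--             i += 2
--         else:
--             new_word.append(word[i])
--             i += 1
--
--     return tuple(new_word)
-- ===== SOURCE B (Python) =====
-- def get_new_word(
--     word: tuple[int, ...],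
--     target_pair: tuple[int, int],
--     new_id: int,
-- ) -> tuple[int, ...]:
--     a, b = target_pair
--     result = []
--     i = 0
--     n = len(word)
--     while True:
--         try:
--             j = word.index(a, i)
--         except ValueError:
--             result.extend(word[i:])
--             break
--         result.extend(word[i:j])
--         if j + 1 < n and word[j + 1] == b:
--             result.append(new_id)
--             i = j + 2
--         else:
--             result.append(word[j])
--             i = j + 1
--     return tuple(result)
-- ===== Notes on version B (the rewrite author's own statement) =====
-- stated objective: alternative
-- what changed: Replaces A's element-by-element index loop with a search-and-splice pass: tuple.index(a, i) jumps to the next candidate 'a', the untouched block word[i:j] is bulk-copied with extend, then the pair check decides whether to emit new_id or the lone 'a'.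
import Mathlib
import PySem

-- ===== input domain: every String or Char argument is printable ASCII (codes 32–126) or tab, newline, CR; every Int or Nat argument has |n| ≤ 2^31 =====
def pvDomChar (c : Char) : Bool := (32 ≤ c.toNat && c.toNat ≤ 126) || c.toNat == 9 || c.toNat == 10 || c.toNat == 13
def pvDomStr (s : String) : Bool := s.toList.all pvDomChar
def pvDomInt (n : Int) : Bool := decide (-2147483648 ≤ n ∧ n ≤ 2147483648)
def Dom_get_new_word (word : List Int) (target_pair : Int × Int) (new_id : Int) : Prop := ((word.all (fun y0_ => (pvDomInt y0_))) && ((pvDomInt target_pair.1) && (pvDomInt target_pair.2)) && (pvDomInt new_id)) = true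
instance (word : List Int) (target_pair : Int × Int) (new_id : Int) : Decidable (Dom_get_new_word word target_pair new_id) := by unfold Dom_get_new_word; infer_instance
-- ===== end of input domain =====

-- B replaces A's element-by-element scan by a search-and-splice pass (jump to the
-- next occurrence of `a`, bulk-copy the untouched block); same O(n) cost (objective: alternative).

-- ===== PORT A =====
-- A's while loop over the cursor i; word[i] with 0 ≤ i < len(word) is exact as getD.
def goA (word : List Int) (a b new_id : Int) (i : Nat) (acc : List Int) : List Int :=
  if i < word.length then
    if i + 1 < word.length ∧ word.getD i 0 = a ∧ word.getD (i + 1) 0 = b then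
      goA word a b new_id (i + 2) (acc ++ [new_id])
    else
      goA word a b new_id (i + 1) (acc ++ [word.getD i 0])
  else acc
termination_by word.length - i

def get_new_word (word : List Int) (target_pair : Int × Int) (new_id : Int) : List Int :=
  goA word target_pair.1 target_pair.2 new_id 0 []

-- ===== PORT B =====
-- word.index(a, i): first index ≥ i holding a (none = ValueError).
def findFrom (word : List Int) (a : Int) (i : Nat) : Option Nat :=
  ((word.drop i).findIdx? (· = a)).map (· + i)

-- port needs this for termination (cited by name in decreasing_by)
theorem findFrom_some_bounds {word : List Int} {a : Int} {i j : Nat}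
    (h : findFrom word a i = some j) : i ≤ j ∧ j < word.length := by
  unfold findFrom at h
  rcases Option.map_eq_some_iff.mp h with ⟨k, hk, rfl⟩
  have := (List.findIdx?_eq_some_iff_findIdx_eq.mp hk).1
  simp [List.length_drop] at this
  omega

-- B's while True loop: jump to next `a`, splice the untouched block, then the pair check.
def goB (word : List Int) (a b new_id : Int) (i : Nat) (res : List Int) : List Int :=
  match h : findFrom word a i with
  | none => res ++ word.drop i
  | some j =>
    let res' := res ++ (word.drop i).take (j - i)
    if j + 1 < word.length ∧ word.getD (j + 1) 0 = b then
      goB word a b new_id (j + 2) (res' ++ [new_id])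
    else
      goB word a b new_id (j + 1) (res' ++ [word.getD j 0])
termination_by word.length + 1 - i
decreasing_by
  · have := findFrom_some_bounds h; omega
  · have := findFrom_some_bounds h; omega

def get_new_word_alt (word : List Int) (target_pair : Int × Int) (new_id : Int) : List Int :=
  goB word target_pair.1 target_pair.2 new_id 0 []

-- ===== PRECONDITION & SPEC =====
def Spec_get_new_word (word : List Int) (target_pair : Int × Int) (new_id : Int) (out : List Int) : Prop := out = get_new_word_alt word target_pair new_id
instance (word : List Int) (target_pair : Int × Int) (new_id : Int) (out : List Int) : Decidable (Spec_get_new_word word target_pair new_id out) := by unfold Spec_get_new_word; infer_instance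

-- ===== CLAIM (what is proved, stated in full; the proofs are below) =====
def Claim_equal_get_new_word : Prop := ∀ (word : List Int) (target_pair : Int × Int) (new_id : Int), Dom_get_new_word word target_pair new_id → Spec_get_new_word word target_pair new_id (get_new_word word target_pair new_id)

-- ===== LEMMAS AND PROOFS =====

theorem findFrom_none_of_ge {word : List Int} {a : Int} {i : Nat}
    (h : word.length ≤ i) : findFrom word a i = none := by
  unfold findFrom
  rw [List.drop_eq_nil_of_le h]
  rfl

theorem findFrom_self {word : List Int} {a : Int} {i : Nat}
    (hi : i < word.length) (ha : word[i] = a) : findFrom word a i = some i := by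
  unfold findFrom
  rw [List.drop_eq_getElem_cons hi, List.findIdx?_cons]
  simp [ha]

theorem findFrom_skip {word : List Int} {a : Int} {i : Nat}
    (hi : i < word.length) (ha : word[i] ≠ a) :
    findFrom word a i = findFrom word a (i + 1) := by
  unfold findFrom
  rw [List.drop_eq_getElem_cons hi, List.findIdx?_cons]
  simp only [decide_eq_true_eq, if_neg ha, Option.map_map]
  congr 1
  funext k
  simp
  omega

-- goB at a position not holding `a` just copies that element and moves on.
theorem goB_skip (word : List Int) (a b new_id : Int) (i : Nat) (res : List Int)
    (hi : i < word.length) (ha : word[i] ≠ a) :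
    goB word a b new_id i res = goB word a b new_id (i + 1) (res ++ [word.getD i 0]) := by
  rw [goB, findFrom_skip hi ha]
  conv_rhs => rw [goB]
  rcases hcase : findFrom word a (i + 1) with _ | j
  · rw [List.drop_eq_getElem_cons hi]
    simp [List.getElem?_eq_getElem hi]
  · have htake : (word.drop i).take (j - i)
        = word.getD i 0 :: (word.drop (i + 1)).take (j - (i + 1)) := by
      rw [List.drop_eq_getElem_cons hi]
      have hj : j - i = (j - (i + 1)) + 1 := by
        have := findFrom_some_bounds hcase; omega
      rw [hj, List.take_succ_cons, List.getD_eq_getElem _ _ hi]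
    simp only [htake]
    split <;> simp

theorem goA_eq_goB (word : List Int) (a b new_id : Int) :
    ∀ n i res, word.length - i ≤ n →
      goA word a b new_id i res = goB word a b new_id i res := by
  intro n
  induction n with
  | zero =>
    intro i res hle
    have hi : word.length ≤ i := by omega
    rw [goA, goB, findFrom_none_of_ge hi]
    simp [List.drop_eq_nil_of_le hi, Nat.not_lt.mpr hi]
  | succ n ih =>
    intro i res hle
    by_cases hi : i < word.length
    · rw [goA, if_pos hi]
      by_cases ha : word[i] = a
      · -- candidate `a` found right here: goB jumps to j = i, empty splice
        rw [goB, findFrom_self hi ha]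
        simp only [Nat.sub_self, List.take_zero, List.append_nil]
        have hga : word.getD i 0 = a := by rw [List.getD_eq_getElem _ _ hi, ha]
        by_cases hp : i + 1 < word.length ∧ word.getD (i + 1) 0 = b
        · rw [if_pos ⟨hp.1, hga, hp.2⟩, if_pos hp]
          exact ih (i + 2) _ (by omega)
        · have : ¬ (i + 1 < word.length ∧ word.getD i 0 = a ∧ word.getD (i + 1) 0 = b) := by
            intro ⟨h1, _, h3⟩; exact hp ⟨h1, h3⟩
          rw [if_neg this, if_neg hp]
          exact ih (i + 1) _ (by omega)
      · -- no `a` here: A copies one element; goB_skip shows B does the same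
        have hga : word.getD i 0 ≠ a := by rw [List.getD_eq_getElem _ _ hi]; exact ha
        have : ¬ (i + 1 < word.length ∧ word.getD i 0 = a ∧ word.getD (i + 1) 0 = b) := by
          intro ⟨_, h2, _⟩; exact hga h2
        rw [if_neg this, goB_skip word a b new_id i res hi ha]
        exact ih (i + 1) _ (by omega)
    · rw [goA, if_neg hi, goB, findFrom_none_of_ge (by omega)]
      simp [List.drop_eq_nil_of_le (by omega : word.length ≤ i)]

-- ===== VERDICT (by name: the statement is the Claim_ definition above) =====
theorem get_new_word_spec : Claim_equal_get_new_word := by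
  intro word tp nid _
  unfold Spec_get_new_word get_new_word get_new_word_alt
  exact goA_eq_goB word tp.1 tp.2 nid word.length 0 [] (by omega)
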